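-- pv_equiv track=rewrite | github.com/keganXi/football-sim | passing.py | get_passing_lane_and_path
-- ===== SOURCE A (Python) =====
-- def get_passing_lane_and_path(start, end):
--     x1, y1 = start
--     x2, y2 = end
--     path = []
--
--     if x1 == x2:
--         # horizontal pass (row stays same, move across columns)
--         step = 1 if y2 > y1 else -1
--         for y in range(y1, y2 + step, step):
--             path.append((x1, y))
--         pass_type = "horizontal pass"
--
--     elif y1 == y2:
--         # vertical pass (column stays same, move across rows)
--         step = 1 if x2 > x1 else -1
--         for x in range(x1, x2 + step, step):
--             path.append((x, y1))
--         pass_type = "vertical pass"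
--
--     elif abs(x2 - x1) == abs(y2 - y1):
--         # diagonal pass
--         step_x = 1 if x2 > x1 else -1
--         step_y = 1 if y2 > y1 else -1
--         x, y = x1, y1
--         while (x, y) != (x2 + step_x, y2 + step_y):
--             path.append((x, y))
--             x += step_x
--             y += step_y
--         pass_type = "diagonal pass"
--
--     else:
--         # Complex pass (needs smarter path finding like A* maybe)
--         pass_type = "complex pass (not straight or diagonal)"
--         path = None
--
--     return pass_type, path
-- ===== SOURCE B (Python) =====
-- def get_passing_lane_and_path(start, end):
--     x1, y1 = start
--     x2, y2 = end
--     dx, dy = x2 - x1, y2 - y1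
--     if dx and dy and abs(dx) != abs(dy):
--         return "complex pass (not straight or diagonal)", None
--     # Retrace the lane BACKWARDS from the target cell to the start cell,
--     # collecting cells in reverse, then flip the list once at the end.
--     sx = (dx > 0) - (dx < 0)
--     sy = (dy > 0) - (dy < 0)
--     rev = []
--     cx, cy = x2, y2
--     while (cx, cy) != (x1, y1):
--         rev.append((cx, cy))
--         cx -= sx
--         cy -= sy
--     rev.append((x1, y1))
--     pass_type = "horizontal pass" if dx == 0 else ("vertical pass" if dy == 0 else "diagonal pass")
--     return pass_type, rev[::-1]
-- ===== Notes on version B (the rewrite author's own statement) =====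
-- stated objective: alternative
-- what changed: Rejects complex passes first, then replaces A's three separate forward path-building loops (two range loops and a manual while-walk) by a single backward retrace from the target cell to the start cell that collects the path in reverse and flips it once at the end; classification becomes a conditional expression.
import Mathlib
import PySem

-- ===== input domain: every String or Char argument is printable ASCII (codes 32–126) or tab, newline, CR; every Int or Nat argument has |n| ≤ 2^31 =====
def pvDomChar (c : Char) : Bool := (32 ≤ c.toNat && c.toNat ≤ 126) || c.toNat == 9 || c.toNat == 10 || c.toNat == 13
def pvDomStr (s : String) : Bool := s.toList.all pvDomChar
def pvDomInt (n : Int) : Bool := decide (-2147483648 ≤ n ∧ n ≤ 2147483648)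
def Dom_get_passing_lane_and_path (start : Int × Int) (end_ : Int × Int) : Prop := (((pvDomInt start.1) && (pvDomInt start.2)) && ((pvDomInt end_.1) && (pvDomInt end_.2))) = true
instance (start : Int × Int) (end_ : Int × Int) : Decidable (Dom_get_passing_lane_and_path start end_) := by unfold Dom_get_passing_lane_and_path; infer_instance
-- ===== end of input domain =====

-- B rejects complex passes first, then retraces the lane backwards from the target to the start and reverses once, replacing A's three forward loop shapes; objective: alternative.


-- ===== PORT A =====
-- A's diagonal while-loop, with fuel making the same computation total (the loop runs
-- |x2-x1|+1 times; the port calls it with fuel |x2-x1|+2, so fuel never runs out).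
def pvDiagLoop (target : Int × Int) (sx sy : Int) : Nat → Int × Int → List (Int × Int)
  | 0, _ => []
  | fuel + 1, p => if p = target then [] else p :: pvDiagLoop target sx sy fuel (p.1 + sx, p.2 + sy)

def get_passing_lane_and_path (start : Int × Int) (end_ : Int × Int) : String × (Option (List (Int × Int))) :=
  let x1 := start.1; let y1 := start.2
  let x2 := end_.1; let y2 := end_.2
  if x1 = x2 then
    let step : Int := if y2 > y1 then 1 else -1
    ("horizontal pass", some ((PySem.List.pyRange y1 (y2 + step) step).map (fun y => (x1, y))))
  else if y1 = y2 then
    let step : Int := if x2 > x1 then 1 else -1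
    ("vertical pass", some ((PySem.List.pyRange x1 (x2 + step) step).map (fun x => (x, y1))))
  else if (x2 - x1).natAbs = (y2 - y1).natAbs then
    let sx : Int := if x2 > x1 then 1 else -1
    let sy : Int := if y2 > y1 then 1 else -1
    ("diagonal pass", some (pvDiagLoop (x2 + sx, y2 + sy) sx sy ((x2 - x1).natAbs + 2) (x1, y1)))
  else
    ("complex pass (not straight or diagonal)", none)

-- ===== PORT B =====
-- B's backward while-loop (retrace from the end cell towards the start cell), with fuel
-- making the same computation total (the loop emits max|dx||dy|+1 cells; fuel is that +1).
def pvBackLoop (startp : Int × Int) (sx sy : Int) : Nat → Int × Int → List (Int × Int)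
  | 0, _ => []
  | fuel + 1, p => if p = startp then [startp] else p :: pvBackLoop startp sx sy fuel (p.1 - sx, p.2 - sy)

def get_passing_lane_and_path_alt (start : Int × Int) (end_ : Int × Int) : String × (Option (List (Int × Int))) :=
  let x1 := start.1; let y1 := start.2
  let x2 := end_.1; let y2 := end_.2
  let dx := x2 - x1; let dy := y2 - y1
  if dx ≠ 0 ∧ dy ≠ 0 ∧ dx.natAbs ≠ dy.natAbs then
    ("complex pass (not straight or diagonal)", none)
  else
    let sx : Int := if dx > 0 then 1 else if dx < 0 then -1 else 0
    let sy : Int := if dy > 0 then 1 else if dy < 0 then -1 else 0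
    let rev := pvBackLoop (x1, y1) sx sy (max dx.natAbs dy.natAbs + 2) (x2, y2)
    let pt := if dx = 0 then "horizontal pass" else if dy = 0 then "vertical pass" else "diagonal pass"
    (pt, some rev.reverse)   -- rev[::-1]

-- ===== PRECONDITION & SPEC =====
def Spec_get_passing_lane_and_path (start : Int × Int) (end_ : Int × Int) (out : String × (Option (List (Int × Int)))) : Prop := out = get_passing_lane_and_path_alt start end_
instance (start : Int × Int) (end_ : Int × Int) (out : String × (Option (List (Int × Int)))) : Decidable (Spec_get_passing_lane_and_path start end_ out) := by unfold Spec_get_passing_lane_and_path; infer_instance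

-- ===== CLAIM (what is proved, stated in full; the proofs are below) =====
def Claim_equal_get_passing_lane_and_path : Prop := ∀ (start : Int × Int) (end_ : Int × Int), Dom_get_passing_lane_and_path start end_ → Spec_get_passing_lane_and_path start end_ (get_passing_lane_and_path start end_)

-- ===== LEMMAS AND PROOFS =====

lemma range_map_eq {α : Type} {n m : Nat} (h : n = m) {f g : Nat → α}
    (hf : ∀ k < n, f k = g k) : (List.range n).map f = (List.range m).map g := by
  subst h
  exact List.map_congr_left fun k hk => hf k (List.mem_range.mp hk)

-- B's backward retrace collects the parametric walk in reverse
lemma backLoop_eq (sx sy : Int) :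
    ∀ (n : Nat) (x y : Int), (n ≠ 0 → sx ≠ 0 ∨ sy ≠ 0) →
      pvBackLoop (x, y) sx sy (n + 2) (x + (n : Int) * sx, y + (n : Int) * sy)
        = ((List.range (n + 1)).map (fun (k : Nat) => (x + (k : Int) * sx, y + (k : Int) * sy))).reverse := by
  intro n
  induction n with
  | zero =>
    intro x y _
    simp [pvBackLoop]
  | succ m ih =>
    intro x y hs
    have hsor := hs (Nat.succ_ne_zero m)
    have hne : ((x + ((m + 1 : Nat) : Int) * sx, y + ((m + 1 : Nat) : Int) * sy) : Int × Int) ≠ (x, y) := by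
      intro h
      rcases hsor with h1 | h1
      · have := congrArg Prod.fst h
        simp at this
        exact h1 (by omega)
      · have := congrArg Prod.snd h
        simp at this
        exact h1 (by omega)
    have hstep : pvBackLoop (x, y) sx sy (m + 1 + 2) (x + ((m + 1 : Nat) : Int) * sx, y + ((m + 1 : Nat) : Int) * sy)
        = (x + ((m + 1 : Nat) : Int) * sx, y + ((m + 1 : Nat) : Int) * sy)
            :: pvBackLoop (x, y) sx sy (m + 2) ((x + ((m + 1 : Nat) : Int) * sx) - sx, (y + ((m + 1 : Nat) : Int) * sy) - sy) := by
      simp only [pvBackLoop, if_neg hne]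
    have hprev : (((x + ((m + 1 : Nat) : Int) * sx) - sx, (y + ((m + 1 : Nat) : Int) * sy) - sy) : Int × Int)
        = (x + (m : Int) * sx, y + (m : Int) * sy) := by
      simp only [Prod.mk.injEq]
      constructor <;> push_cast <;> ring
    have hr : ((List.range (m + 1 + 1)).map (fun (k : Nat) => (x + (k : Int) * sx, y + (k : Int) * sy))).reverse
        = (x + ((m + 1 : Nat) : Int) * sx, y + ((m + 1 : Nat) : Int) * sy)
            :: ((List.range (m + 1)).map (fun (k : Nat) => (x + (k : Int) * sx, y + (k : Int) * sy))).reverse := by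
      rw [List.range_succ, List.map_append, List.reverse_append]
      simp
    rw [hstep, hprev, ih x y (fun _ => hsor), hr]

-- B's final path (the retrace, reversed) is the forward parametric walk
lemma alt_path (x1 y1 sx sy : Int) (n : Nat) (hs : n ≠ 0 → sx ≠ 0 ∨ sy ≠ 0) :
    (pvBackLoop (x1, y1) sx sy (n + 2) (x1 + (n : Int) * sx, y1 + (n : Int) * sy)).reverse
      = (List.range (n + 1)).map (fun (k : Nat) => (x1 + (k : Int) * sx, y1 + (k : Int) * sy)) := by
  rw [backLoop_eq sx sy n x1 y1 hs, List.reverse_reverse]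

-- A's diagonal loop computes the parametric walk
lemma diagLoop_eq (sx sy : Int) (hsx : sx = 1 ∨ sx = -1) :
    ∀ (n : Nat) (x y : Int),
      pvDiagLoop (x + ((n : Int) + 1) * sx, y + ((n : Int) + 1) * sy) sx sy (n + 2) (x, y)
        = (List.range (n + 1)).map (fun (k : Nat) => (x + (k : Int) * sx, y + (k : Int) * sy)) := by
  intro n
  induction n with
  | zero =>
    intro x y
    have hne : (x, y) ≠ ((x + ((0 : Nat) + 1 : Int) * sx, y + ((0 : Nat) + 1 : Int) * sy) : Int × Int) := by
      intro h
      have := congrArg Prod.fst h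
      rcases hsx with h1 | h1 <;> rw [h1] at this <;> simp at this
    have hstop : ((x + sx, y + sy) : Int × Int) = (x + ((0 : Nat) + 1 : Int) * sx, y + ((0 : Nat) + 1 : Int) * sy) := by
      simp
    simp only [pvDiagLoop, if_neg hne]
    simp [hstop, List.range_succ]
  | succ m ih =>
    intro x y
    have hne : (x, y) ≠ ((x + ((m + 1 : Nat) + 1 : Int) * sx, y + ((m + 1 : Nat) + 1 : Int) * sy) : Int × Int) := by
      intro h
      have := congrArg Prod.fst h
      rcases hsx with h1 | h1 <;> rw [h1] at this <;> simp at this <;> omega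
    have hstep : pvDiagLoop (x + ((m + 1 : Nat) + 1 : Int) * sx, y + ((m + 1 : Nat) + 1 : Int) * sy) sx sy (m + 1 + 2) (x, y)
        = (x, y) :: pvDiagLoop (x + ((m + 1 : Nat) + 1 : Int) * sx, y + ((m + 1 : Nat) + 1 : Int) * sy) sx sy (m + 2) (x + sx, y + sy) := by
      simp only [pvDiagLoop, if_neg hne]
    have htgt : ((x + ((m + 1 : Nat) + 1 : Int) * sx, y + ((m + 1 : Nat) + 1 : Int) * sy) : Int × Int)
        = ((x + sx) + ((m : Int) + 1) * sx, (y + sy) + ((m : Int) + 1) * sy) := by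
      simp only [Prod.mk.injEq]
      constructor <;> push_cast <;> ring
    have hr : (List.range (m + 1 + 1)).map (fun (k : Nat) => (x + (k : Int) * sx, y + (k : Int) * sy))
        = (x, y) :: (List.range (m + 1)).map (fun (k : Nat) => ((x + sx) + (k : Int) * sx, (y + sy) + (k : Int) * sy)) := by
      rw [List.range_succ_eq_map, List.map_cons, List.map_map]
      refine congrArg₂ List.cons (by simp) ?_
      refine range_map_eq rfl ?_
      intro k _
      simp only [Function.comp, Nat.succ_eq_add_one, Prod.mk.injEq]
      constructor <;> push_cast <;> ring
    rw [hstep, htgt, ih (x + sx) (y + sy), hr]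

-- ===== VERDICT (by name: the statement is the Claim_ definition above) =====
theorem get_passing_lane_and_path_spec : Claim_equal_get_passing_lane_and_path := by
  rintro ⟨x1, y1⟩ ⟨x2, y2⟩ _
  show get_passing_lane_and_path (x1, y1) (x2, y2) = get_passing_lane_and_path_alt (x1, y1) (x2, y2)
  simp only [get_passing_lane_and_path, get_passing_lane_and_path_alt]
  by_cases hx : x1 = x2
  · -- horizontal
    subst hx
    rw [if_pos rfl, if_neg (by simp : ¬ (x1 - x1 ≠ 0 ∧ y2 - y1 ≠ 0 ∧ (x1 - x1).natAbs ≠ (y2 - y1).natAbs)),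
        if_pos (sub_self x1)]
    rcases lt_trichotomy y1 y2 with hy | hy | hy
    · rw [if_pos hy]
      refine congrArg _ (congrArg _ ?_)
      rw [if_neg (by omega : ¬ (x1 - x1 > 0)), if_neg (by omega : ¬ (x1 - x1 < 0)),
          if_pos (by omega : y2 - y1 > 0)]
      have hmax : max (x1 - x1).natAbs (y2 - y1).natAbs = (y2 - y1).natAbs := by simp [sub_self]
      have hend : ((x1, y2) : Int × Int) = (x1 + ((y2 - y1).natAbs : Int) * 0, y1 + ((y2 - y1).natAbs : Int) * 1) := by
        simp only [Prod.mk.injEq, mul_zero, mul_one]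
        omega
      rw [hmax, hend, alt_path x1 y1 0 1 _ (fun _ => Or.inr one_ne_zero),
          PySem.List.pyRange_one, List.map_map]
      refine range_map_eq (by omega) ?_
      intro k _
      simp
    · subst hy
      rw [if_neg (lt_irrefl y1)]
      refine congrArg _ (congrArg _ ?_)
      rw [if_neg (by omega : ¬ (x1 - x1 > 0)), if_neg (by omega : ¬ (x1 - x1 < 0)),
          if_neg (by omega : ¬ (y1 - y1 > 0)), if_neg (by omega : ¬ (y1 - y1 < 0))]
      have hmax : max (x1 - x1).natAbs (y1 - y1).natAbs = 0 := by simp [sub_self]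
      have hone : (y1 - (y1 + -1)).toNat = 1 := by omega
      rw [hmax, PySem.List.pyRange_neg_one, hone]
      simp [pvBackLoop, List.range_succ]
    · rw [if_neg (by omega : ¬ (y2 > y1))]
      refine congrArg _ (congrArg _ ?_)
      rw [if_neg (by omega : ¬ (x1 - x1 > 0)), if_neg (by omega : ¬ (x1 - x1 < 0)),
          if_neg (by omega : ¬ (y2 - y1 > 0)), if_pos (by omega : y2 - y1 < 0)]
      have hmax : max (x1 - x1).natAbs (y2 - y1).natAbs = (y2 - y1).natAbs := by simp [sub_self]
      have hend : ((x1, y2) : Int × Int) = (x1 + ((y2 - y1).natAbs : Int) * 0, y1 + ((y2 - y1).natAbs : Int) * (-1)) := by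
        simp only [Prod.mk.injEq, mul_zero, mul_neg_one]
        omega
      rw [hmax, hend, alt_path x1 y1 0 (-1) _ (fun _ => Or.inr (by norm_num)),
          PySem.List.pyRange_neg_one, List.map_map]
      refine range_map_eq (by omega) ?_
      intro k _
      simp [Function.comp]
      omega
  · rw [if_neg hx]
    by_cases hy : y1 = y2
    · -- vertical
      subst hy
      rw [if_pos rfl, if_neg (by simp : ¬ (x2 - x1 ≠ 0 ∧ y1 - y1 ≠ 0 ∧ (x2 - x1).natAbs ≠ (y1 - y1).natAbs)),
          if_neg (by omega : ¬ (x2 - x1 = 0)), if_pos (sub_self y1)]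
      rcases lt_trichotomy x1 x2 with hxx | hxx | hxx
      · rw [if_pos hxx]
        refine congrArg _ (congrArg _ ?_)
        rw [if_pos (by omega : x2 - x1 > 0), if_neg (by omega : ¬ (y1 - y1 > 0)),
            if_neg (by omega : ¬ (y1 - y1 < 0))]
        have hmax : max (x2 - x1).natAbs (y1 - y1).natAbs = (x2 - x1).natAbs := by simp [sub_self]
        have hend : ((x2, y1) : Int × Int) = (x1 + ((x2 - x1).natAbs : Int) * 1, y1 + ((x2 - x1).natAbs : Int) * 0) := by
          simp only [Prod.mk.injEq, mul_zero, mul_one]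
          omega
        rw [hmax, hend, alt_path x1 y1 1 0 _ (fun _ => Or.inl one_ne_zero),
            PySem.List.pyRange_one, List.map_map]
        refine range_map_eq (by omega) ?_
        intro k _
        simp
      · exact absurd hxx hx
      · rw [if_neg (by omega : ¬ (x2 > x1))]
        refine congrArg _ (congrArg _ ?_)
        rw [if_neg (by omega : ¬ (x2 - x1 > 0)), if_pos (by omega : x2 - x1 < 0),
            if_neg (by omega : ¬ (y1 - y1 > 0)), if_neg (by omega : ¬ (y1 - y1 < 0))]
        have hmax : max (x2 - x1).natAbs (y1 - y1).natAbs = (x2 - x1).natAbs := by simp [sub_self]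
        have hend : ((x2, y1) : Int × Int) = (x1 + ((x2 - x1).natAbs : Int) * (-1), y1 + ((x2 - x1).natAbs : Int) * 0) := by
          simp only [Prod.mk.injEq, mul_zero, mul_neg_one]
          omega
        rw [hmax, hend, alt_path x1 y1 (-1) 0 _ (fun _ => Or.inl (by norm_num)),
            PySem.List.pyRange_neg_one, List.map_map]
        refine range_map_eq (by omega) ?_
        intro k _
        simp [Function.comp]
        omega
    · rw [if_neg hy]
      by_cases habs : (x2 - x1).natAbs = (y2 - y1).natAbs
      · -- diagonal
        rw [if_pos habs,
            if_neg (by simp [habs] : ¬ (x2 - x1 ≠ 0 ∧ y2 - y1 ≠ 0 ∧ (x2 - x1).natAbs ≠ (y2 - y1).natAbs)),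
            if_neg (by omega : ¬ (x2 - x1 = 0)), if_neg (by omega : ¬ (y2 - y1 = 0))]
        refine congrArg _ (congrArg _ ?_)
        set N := (x2 - x1).natAbs with hN
        have hmax : max (x2 - x1).natAbs (y2 - y1).natAbs = N := by omega
        have hsxA : (if x2 > x1 then (1 : Int) else -1) = (if x2 - x1 > 0 then (1 : Int) else if x2 - x1 < 0 then -1 else 0) := by
          by_cases h : x2 > x1
          · rw [if_pos h, if_pos (by omega : x2 - x1 > 0)]
          · rw [if_neg h, if_neg (by omega : ¬ (x2 - x1 > 0)), if_pos (by omega : x2 - x1 < 0)]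
        have hsyA : (if y2 > y1 then (1 : Int) else -1) = (if y2 - y1 > 0 then (1 : Int) else if y2 - y1 < 0 then -1 else 0) := by
          by_cases h : y2 > y1
          · rw [if_pos h, if_pos (by omega : y2 - y1 > 0)]
          · rw [if_neg h, if_neg (by omega : ¬ (y2 - y1 > 0)), if_pos (by omega : y2 - y1 < 0)]
        rw [hmax, ← hsxA, ← hsyA]
        set sx : Int := if x2 > x1 then 1 else -1 with hsx
        set sy : Int := if y2 > y1 then 1 else -1 with hsy
        have hsx1 : sx = 1 ∨ sx = -1 := by rw [hsx]; split_ifs <;> simp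
        have hsy1 : sy = 1 ∨ sy = -1 := by rw [hsy]; split_ifs <;> simp
        have htx : x2 + sx = x1 + ((N : Int) + 1) * sx := by
          rw [hsx]
          split_ifs with h
          · simp only [hN, mul_one]; omega
          · simp only [hN, mul_neg_one]; omega
        have hty : y2 + sy = y1 + ((N : Int) + 1) * sy := by
          rw [hsy]
          split_ifs with h
          · simp only [hN, mul_one]; omega
          · simp only [hN, mul_neg_one]; omega
        have hend : ((x2, y2) : Int × Int) = (x1 + (N : Int) * sx, y1 + (N : Int) * sy) := by
          simp only [Prod.mk.injEq]
          constructor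
          · rcases hsx1 with h | h <;> rw [h] at htx ⊢ <;> omega
          · rcases hsy1 with h | h <;> rw [h] at hty ⊢ <;> omega
        have hsne : N ≠ 0 → sx ≠ 0 ∨ sy ≠ 0 := by
          intro _
          rcases hsx1 with h | h <;> rw [h] <;> norm_num
        rw [hend, alt_path x1 y1 sx sy N hsne, htx, hty]
        exact diagLoop_eq sx sy hsx1 N x1 y1
      · rw [if_neg habs,
            if_pos (⟨by omega, by omega, habs⟩ : (x2 - x1 ≠ 0 ∧ y2 - y1 ≠ 0 ∧ (x2 - x1).natAbs ≠ (y2 - y1).natAbs))]
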